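-- pv_equiv track=rewrite | github.com/kunal0011/myWorksSpace | python/src/leetcode/slidingwindow/distinctNumbersInEachSubarray1852.py | distinctNumbersInEachSubarray
-- ===== SOURCE A (Python) =====
-- def distinctNumbersInEachSubarray(arr: list[int], k: int) -> list[int]:
--     n = len(arr)
--     if k > n:
--         return []
--
--     # Dictionary to keep track of the count of each number in the current window
--     freq_map = {}
--     result = []
--
--     # Initialize the frequency map with the first window
--     for i in range(k):
--         freq_map[arr[i]] = freq_map.get(arr[i], 0) + 1
--
--     # Add the count of distinct numbers in the first window
--     result.append(len(freq_map))
--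
--     # Slide the window through the array
--     for i in range(k, n):
--         # Remove the element going out of the window
--         out_elem = arr[i - k]
--         freq_map[out_elem] -= 1
--         if freq_map[out_elem] == 0:
--             del freq_map[out_elem]
--
--         # Add the new element coming into the window
--         in_elem = arr[i]
--         freq_map[in_elem] = freq_map.get(in_elem, 0) + 1
--
--         # Add the count of distinct numbers in the current window
--         result.append(len(freq_map))
--
--     return result
-- ===== SOURCE B (Python) =====
-- def distinctNumbersInEachSubarray(arr: list[int], k: int) -> list[int]:
--     n = len(arr)
--     if k > n:
--         return []
--     return [len(set(arr[i:i + k])) for i in range(n - k + 1)]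
-- ===== Notes on version B (the rewrite author's own statement) =====
-- stated objective: simpler
-- what changed: Replaced the incremental sliding frequency map (add/decrement/delete bookkeeping) with a direct per-window scan that takes len(set(arr[i:i+k])) for each window start.
import Mathlib
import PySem

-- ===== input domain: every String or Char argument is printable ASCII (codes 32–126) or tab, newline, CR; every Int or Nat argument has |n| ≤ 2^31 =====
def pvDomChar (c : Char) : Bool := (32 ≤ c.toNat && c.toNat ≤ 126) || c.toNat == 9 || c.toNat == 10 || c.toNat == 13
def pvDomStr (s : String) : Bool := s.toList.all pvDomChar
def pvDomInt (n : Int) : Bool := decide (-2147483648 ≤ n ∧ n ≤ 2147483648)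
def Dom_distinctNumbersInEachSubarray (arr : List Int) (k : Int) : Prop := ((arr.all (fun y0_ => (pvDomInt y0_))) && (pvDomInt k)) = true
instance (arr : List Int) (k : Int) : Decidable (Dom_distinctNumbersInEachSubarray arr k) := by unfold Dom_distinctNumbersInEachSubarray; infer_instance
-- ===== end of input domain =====

-- B replaces A's incremental sliding frequency map with a direct per-window len(set(arr[i:i+k])) scan (objective: simpler).

-- ===== PORT A =====
-- A-side helper: the body of A's slide loop, one iteration (a literal transliteration);
-- `freq_map[out_elem] -= 1` is a KeyError when the key is absent — that happens only
-- outside Pre_, so the total `getD` transliteration is exact inside Pre_.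
def pvStepA (arr : List Int) (k : Int) (st : PySem.Dict Int Int × List Int) (i : Int) :
    PySem.Dict Int Int × List Int :=
  let out_elem := PySem.List.pyGetD arr (i - k) 0
  let fm1 := st.1.insert out_elem (st.1.getD out_elem 0 - 1)
  let fm2 := if fm1.getD out_elem 0 = 0 then fm1.erase out_elem else fm1
  let in_elem := PySem.List.pyGetD arr i 0
  let fm3 := fm2.insert in_elem (fm2.getD in_elem 0 + 1)
  (fm3, st.2 ++ [(fm3.size : Int)])

def distinctNumbersInEachSubarray (arr : List Int) (k : Int) : List Int :=
  let n : Int := (arr.length : Int)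
  if k > n then []
  else
    -- first loop: initialize the frequency map with the first window
    let freq_map : PySem.Dict Int Int :=
      (PySem.List.pyRange 0 k 1).foldl
        (fun fm i =>
          fm.insert (PySem.List.pyGetD arr i 0) (fm.getD (PySem.List.pyGetD arr i 0) 0 + 1))
        PySem.Dict.empty
    let result : List Int := [(freq_map.size : Int)]
    -- slide loop
    let st := (PySem.List.pyRange k n 1).foldl (pvStepA arr k) (freq_map, result)
    st.2

-- ===== PORT B =====
def distinctNumbersInEachSubarray_alt (arr : List Int) (k : Int) : List Int :=
  let n : Int := (arr.length : Int)
  if k > n then []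
  else
    (PySem.List.pyRange 0 (n - k + 1) 1).map
      (fun i => ((PySem.Set.ofList (PySem.List.slice arr (some i) (some (i + k)))).length : Int))

-- ===== PRECONDITION & SPEC =====
-- Pre_ excludes exactly the inputs where A raises: k ≤ 0 with a nonempty arr (KeyError in the
-- slide loop) or k < 0 with an empty arr (IndexError); for k = 0 and arr = [] A returns [0].
def Pre_distinctNumbersInEachSubarray (arr : List Int) (k : Int) : Prop :=
  1 ≤ k ∨ (k = 0 ∧ arr = [])
instance (arr : List Int) (k : Int) : Decidable (Pre_distinctNumbersInEachSubarray arr k) := by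
  unfold Pre_distinctNumbersInEachSubarray; infer_instance

def pvWitness_distinctNumbersInEachSubarray : List Int × Int := ([1, 2, 1, 3], 2)

def Spec_distinctNumbersInEachSubarray (arr : List Int) (k : Int) (out : List Int) : Prop := out = distinctNumbersInEachSubarray_alt arr k
instance (arr : List Int) (k : Int) (out : List Int) : Decidable (Spec_distinctNumbersInEachSubarray arr k out) := by unfold Spec_distinctNumbersInEachSubarray; infer_instance

-- ===== CLAIM (what is proved, stated in full; the proofs are below) =====
def Claim_equal_distinctNumbersInEachSubarray : Prop := ∀ (arr : List Int) (k : Int), Dom_distinctNumbersInEachSubarray arr k → Pre_distinctNumbersInEachSubarray arr k → Spec_distinctNumbersInEachSubarray arr k (distinctNumbersInEachSubarray arr k)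

-- ===== LEMMAS AND PROOFS =====

/-- The number of distinct elements of a window, as B computes it. -/
def pvDistinct (w : List Int) : Int := ((PySem.Set.ofList w).length : Int)

/-- Semantic invariant tying A's frequency map to the current window `w`:
keys are distinct, values are multiplicities, keys are exactly the window's elements. -/
def pvInv (d : PySem.Dict Int Int) (w : List Int) : Prop :=
  d.keys.Nodup ∧ (∀ a : Int, d.getD a 0 = (w.count a : Int)) ∧ (∀ a : Int, a ∈ d.keys ↔ a ∈ w)

lemma pv_find?_filter_ne (items : List (Int × Int)) (k a : Int) (h : a ≠ k) :
    (items.filter (fun p => !(p.1 == k))).find? (fun p => p.1 == a)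
      = items.find? (fun p => p.1 == a) := by
  induction items with
  | nil => simp
  | cons p rest ih =>
    by_cases hpk : p.1 = k
    · have hpa : (p.1 == a) = false := by simp [hpk, Ne.symm h]
      rw [List.filter_cons, if_neg (by simp [hpk]), List.find?_cons, hpa, ih]
    · rw [List.filter_cons, if_pos (by simp [hpk]), List.find?_cons, List.find?_cons]
      cases hpa : (p.1 == a) with
      | true => rfl
      | false => exact ih

lemma pv_find?_filter_self (items : List (Int × Int)) (k : Int) :
    (items.filter (fun p => !(p.1 == k))).find? (fun p => p.1 == k) = none := by
  rw [List.find?_eq_none]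
  intro p hp
  have := (List.mem_filter.mp hp).2
  simpa using this

lemma pv_getD_erase (d : PySem.Dict Int Int) (k a : Int) :
    (d.erase k).getD a 0 = if a = k then 0 else d.getD a 0 := by
  by_cases h : a = k
  · subst h
    unfold PySem.Dict.getD PySem.Dict.get? PySem.Dict.erase
    rw [if_pos rfl]
    have := pv_find?_filter_self d.items a
    rw [this]
    rfl
  · simp [PySem.Dict.getD, PySem.Dict.get?, PySem.Dict.erase, pv_find?_filter_ne _ _ _ h, h]

lemma pv_mem_keys_erase (d : PySem.Dict Int Int) (k a : Int) :
    a ∈ (d.erase k).keys ↔ a ∈ d.keys ∧ a ≠ k := by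
  simp only [PySem.Dict.keys, PySem.Dict.erase, List.mem_map, List.mem_filter]
  constructor
  · rintro ⟨p, ⟨hp, hk⟩, rfl⟩
    exact ⟨⟨p, hp, rfl⟩, by simpa using hk⟩
  · rintro ⟨⟨p, hp, rfl⟩, hk⟩
    exact ⟨p, ⟨hp, by simpa using hk⟩, rfl⟩

lemma pv_nodup_keys_erase (d : PySem.Dict Int Int) (k : Int) (h : d.keys.Nodup) :
    (d.erase k).keys.Nodup := by
  have hsub : (d.erase k).items.Sublist d.items := List.filter_sublist
  exact h.sublist (hsub.map _)

lemma pv_size_eq (d : PySem.Dict Int Int) (w : List Int) (h : pvInv d w) :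
    (d.size : Int) = pvDistinct w := by
  obtain ⟨hnd, _, hmem⟩ := h
  have hlen : d.keys.length = (PySem.Set.ofList w).length := by
    refine (List.Perm.length_eq ?_)
    refine (List.perm_ext_iff_of_nodup hnd (PySem.Set.nodup_ofList w)).mpr ?_
    intro a
    rw [PySem.Set.mem_ofList]
    exact hmem a
  have hsz : d.size = d.keys.length := (List.length_map _).symm
  simp [pvDistinct, hsz, hlen]

lemma pvInv_counter (w : List Int) : pvInv (PySem.Dict.counter w) w := by
  refine ⟨PySem.Dict.nodup_keys_counter w, ?_, ?_⟩
  · intro a; simpa using PySem.Dict.getD_counter w a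
  · intro a; rw [PySem.Dict.keys_counter]; exact PySem.Set.mem_ofList w a

lemma pvInv_push (d : PySem.Dict Int Int) (t : List Int) (y : Int) (h : pvInv d t) :
    pvInv (d.insert y (d.getD y 0 + 1)) (t ++ [y]) := by
  obtain ⟨hnd, hcnt, hmem⟩ := h
  refine ⟨PySem.Dict.nodup_keys_insert d y _ hnd, ?_, ?_⟩
  · intro a
    rw [PySem.Dict.getD_insert]
    by_cases ha : a = y
    · subst ha
      simp [hcnt a, List.count_append]
    · simp [ha, hcnt a, List.count_append, Ne.symm ha]
  · intro a
    rw [PySem.Dict.mem_keys_insert]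
    simp [hmem a, or_comm]

lemma pvInv_tail (d : PySem.Dict Int Int) (x : Int) (t : List Int) (h : pvInv d (x :: t)) :
    pvInv (if (d.insert x (d.getD x 0 - 1)).getD x 0 = 0
           then (d.insert x (d.getD x 0 - 1)).erase x
           else d.insert x (d.getD x 0 - 1)) t := by
  obtain ⟨hnd, hcnt, hmem⟩ := h
  have hx : d.getD x 0 = ((x :: t).count x : Int) := hcnt x
  have hd1cnt : ∀ a : Int, (d.insert x (d.getD x 0 - 1)).getD a 0
      = if a = x then ((x :: t).count x : Int) - 1 else ((x :: t).count a : Int) := by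
    intro a
    rw [PySem.Dict.getD_insert]
    by_cases ha : a = x
    · simp [ha, hx]
    · simp [ha, hcnt a]
  have hd1x : (d.insert x (d.getD x 0 - 1)).getD x 0 = ((x :: t).count x : Int) - 1 := by
    simpa using hd1cnt x
  have hcx : (x :: t).count x = t.count x + 1 := by simp [List.count_cons]
  by_cases hzero : (d.insert x (d.getD x 0 - 1)).getD x 0 = 0
  · -- count of x in window was 1, i.e. x ∉ t; the key is deleted
    have htx : t.count x = 0 := by
      rw [hd1x] at hzero
      have : ((x :: t).count x : Int) = 1 := by omega
      omega
    have hxt : x ∉ t := by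
      rw [← List.count_eq_zero]; exact htx
    rw [if_pos hzero]
    refine ⟨pv_nodup_keys_erase _ _ (PySem.Dict.nodup_keys_insert d x _ hnd), ?_, ?_⟩
    · intro a
      rw [pv_getD_erase]
      by_cases ha : a = x
      · simp [ha, htx]
      · rw [if_neg ha, hd1cnt a, if_neg ha]
        simp [Ne.symm ha]
    · intro a
      rw [pv_mem_keys_erase, PySem.Dict.mem_keys_insert]
      constructor
      · rintro ⟨h1, h2⟩
        rcases h1 with h1 | h1
        · exact absurd h1 h2
        · have := (hmem a).mp h1
          rcases List.mem_cons.mp this with h3 | h3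
          · exact absurd h3 h2
          · exact h3
      · intro hat
        have hax : a ≠ x := fun he => hxt (he ▸ hat)
        exact ⟨Or.inr ((hmem a).mpr (List.mem_cons_of_mem _ hat)), hax⟩
  · -- count of x in window was ≥ 2; the decremented entry stays
    have htx : 0 < t.count x := by
      rw [hd1x] at hzero
      omega
    rw [if_neg hzero]
    refine ⟨PySem.Dict.nodup_keys_insert d x _ hnd, ?_, ?_⟩
    · intro a
      rw [hd1cnt a]
      by_cases ha : a = x
      · simp [ha, hcx]
      · rw [if_neg ha]
        simp [Ne.symm ha]
    · intro a
      rw [PySem.Dict.mem_keys_insert]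
      constructor
      · rintro (h1 | h1)
        · exact h1 ▸ List.count_pos_iff.mp htx
        · have := (hmem a).mp h1
          rcases List.mem_cons.mp this with h3 | h3
          · exact h3 ▸ List.count_pos_iff.mp htx
          · exact h3
      · intro hat
        exact Or.inr ((hmem a).mpr (List.mem_cons_of_mem _ hat))

lemma pv_window_cons (arr : List Int) (j K : Nat) (hK : 1 ≤ K) (hj : j < arr.length) :
    (arr.drop j).take K = arr[j] :: (arr.drop (j + 1)).take (K - 1) := by
  obtain ⟨K', rfl⟩ : ∃ K', K = K' + 1 := ⟨K - 1, by omega⟩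
  rw [Nat.add_sub_cancel, List.drop_eq_getElem_cons hj, List.take_succ_cons]

lemma pv_window_snoc (arr : List Int) (j K : Nat) (hK : 1 ≤ K) (hjK : j + K < arr.length) :
    (arr.drop (j + 1)).take (K - 1) ++ [arr[j + K]] = (arr.drop (j + 1)).take K := by
  obtain ⟨K', rfl⟩ : ∃ K', K = K' + 1 := ⟨K - 1, by omega⟩
  have hK' : K' < (arr.drop (j + 1)).length := by
    rw [List.length_drop]; omega
  rw [List.take_add_one, List.getElem?_eq_getElem hK']
  have : (arr.drop (j + 1))[K'] = arr[j + K' + 1] := by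
    rw [List.getElem_drop]
    congr 1
    omega
  simp [this, show j + (K' + 1) = j + K' + 1 by omega]

lemma pv_foldl_range_getD {β : Type} (xs : List Int) (K : Nat) (hK : K ≤ xs.length)
    (f : β → Int → β) (init : β) :
    (List.range K).foldl (fun acc j => f acc (xs.getD j 0)) init = (xs.take K).foldl f init := by
  induction K generalizing init with
  | zero => simp
  | succ K' ih =>
    have hK' : K' < xs.length := by omega
    rw [List.range_succ, List.foldl_append, ih (by omega), List.take_add_one,
      List.getElem?_eq_getElem hK', List.foldl_append]
    simp [List.getD, List.getElem?_eq_getElem hK']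

/-- The initialization loop builds the counter of the first window. -/
lemma pv_init_eq (arr : List Int) (k : Int) (hk : 0 ≤ k) (hkn : k ≤ (arr.length : Int)) :
    (PySem.List.pyRange 0 k 1).foldl
      (fun fm i =>
        fm.insert (PySem.List.pyGetD arr i 0) (fm.getD (PySem.List.pyGetD arr i 0) 0 + 1))
      PySem.Dict.empty
    = PySem.Dict.counter (arr.take k.toNat) := by
  rw [PySem.List.pyRange_one, List.foldl_map]
  simp only [zero_add, Int.sub_zero, PySem.List.pyGetD_natCast]
  refine Eq.trans (pv_foldl_range_getD (β := PySem.Dict Int Int) arr k.toNat (by omega)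
    (fun d x => d.insert x (d.getD x 0 + 1)) PySem.Dict.empty) ?_
  rw [PySem.Dict.foldl_insert_getD_add_one_eq_counter]

/-- The slide loop, characterized: starting from an invariant-satisfying map for the window
ending just before position `i`, it appends the distinct count of each subsequent window. -/
lemma pv_loop_spec (arr : List Int) (k : Int) (hk : 1 ≤ k) :
    ∀ (m : Nat) (i : Int), k ≤ i → i + m = (arr.length : Int) →
    ∀ (d : PySem.Dict Int Int) (res : List Int),
      pvInv d ((arr.drop (i - k).toNat).take k.toNat) →
      ((PySem.List.pyRange i (arr.length : Int) 1).foldl (pvStepA arr k) (d, res)).2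
      = res ++ (List.range m).map
          (fun j => pvDistinct ((arr.drop ((i - k).toNat + 1 + j)).take k.toNat)) := by
  intro m
  induction m with
  | zero =>
    intro i hki hlen d res _
    rw [PySem.List.pyRange_one_eq_nil (by omega)]
    simp
  | succ m' ih =>
    intro i hki hlen d res hinv
    have hilt : i < (arr.length : Int) := by omega
    rw [PySem.List.pyRange_one_cons hilt, List.foldl_cons]
    set j : Nat := (i - k).toNat with hj
    have hjlt : j < arr.length := by omega
    have hout : PySem.List.pyGetD arr (i - k) 0 = arr[j] := by
      rw [PySem.List.pyGetD_eq_getElem arr 0 (by omega) (by omega)]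
    have hiK : i.toNat = j + k.toNat := by omega
    have hjKlt : j + k.toNat < arr.length := by omega
    have hin : PySem.List.pyGetD arr i 0 = arr[j + k.toNat] := by
      rw [PySem.List.pyGetD_eq_getElem arr 0 (by omega) (by omega)]
      simp only [hiK]
    -- the window decomposition
    have hwin : (arr.drop j).take k.toNat = arr[j] :: (arr.drop (j + 1)).take (k.toNat - 1) :=
      pv_window_cons arr j k.toNat (by omega) hjlt
    rw [hwin] at hinv
    have hinv2 := pvInv_tail d arr[j] _ hinv
    have hinv3 := pvInv_push _ _ arr[j + k.toNat] hinv2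
    rw [pv_window_snoc arr j k.toNat (by omega) hjKlt] at hinv3
    -- evaluate one step of the fold
    have hstep :
        pvStepA arr k (d, res) i
        = (((if (d.insert arr[j] (d.getD arr[j] 0 - 1)).getD arr[j] 0 = 0
              then (d.insert arr[j] (d.getD arr[j] 0 - 1)).erase arr[j]
              else d.insert arr[j] (d.getD arr[j] 0 - 1)).insert arr[j + k.toNat]
              ((if (d.insert arr[j] (d.getD arr[j] 0 - 1)).getD arr[j] 0 = 0
                then (d.insert arr[j] (d.getD arr[j] 0 - 1)).erase arr[j]
                else d.insert arr[j] (d.getD arr[j] 0 - 1)).getD arr[j + k.toNat] 0 + 1)),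
            res ++ [pvDistinct ((arr.drop (j + 1)).take k.toNat)]) := by
      unfold pvStepA
      simp only [hout, hin]
      rw [pv_size_eq _ _ hinv3]
    rw [hstep]
    rw [ih (i + 1) (by omega) (by omega) _ _ (by
      have : (i + 1 - k).toNat = j + 1 := by omega
      rw [this]; exact hinv3)]
    have hidx : (i + 1 - k).toNat = j + 1 := by omega
    rw [hidx, List.append_assoc]
    congr 1
    rw [List.range_succ_eq_map, List.map_cons, List.map_map]
    simp only [Nat.add_zero, List.cons_append, List.nil_append]
    congr 1
    apply List.map_congr_left
    intro b _
    simp only [Function.comp_apply, Nat.succ_eq_add_one]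
    have hb : j + 1 + (b + 1) = j + 1 + 1 + b := by omega
    rw [hb]

-- ===== VERDICT (by name: the statement is the Claim_ definition above) =====
theorem distinctNumbersInEachSubarray_spec : Claim_equal_distinctNumbersInEachSubarray := by
  intro arr k _ hpre
  unfold Spec_distinctNumbersInEachSubarray
  rcases hpre with hk | ⟨hk0, harr⟩
  · by_cases hkn : k > (arr.length : Int)
    · simp [distinctNumbersInEachSubarray, distinctNumbersInEachSubarray_alt, hkn]
    · rw [not_lt] at hkn
      unfold distinctNumbersInEachSubarray distinctNumbersInEachSubarray_alt
      rw [if_neg (by omega), if_neg (by omega)]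
      simp only []
      rw [pv_init_eq arr k (by omega) hkn]
      have hfirst : pvInv (PySem.Dict.counter (arr.take k.toNat)) (arr.take k.toNat) :=
        pvInv_counter _
      rw [pv_loop_spec arr k hk ((arr.length : Int) - k).toNat k (le_refl k) (by omega)
        _ _ (by
          have : (k - k).toNat = 0 := by omega
          rw [this, List.drop_zero]
          exact hfirst)]
      have hsz : ((PySem.Dict.counter (arr.take k.toNat)).size : Int)
          = pvDistinct (arr.take k.toNat) := pv_size_eq _ _ hfirst
      rw [hsz]
      -- now both sides are explicit lists of window distinct counts
      rw [PySem.List.pyRange_one, List.map_map]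
      have hcomp : ((fun i : Int =>
            ((PySem.Set.ofList (PySem.List.slice arr (some i) (some (i + k)))).length : Int))
            ∘ (fun j : Nat => (0 : Int) + (j : Int)))
          = fun j : Nat => pvDistinct ((arr.drop j).take k.toNat) := by
        funext j
        simp only [Function.comp_apply, zero_add]
        have hk' : ((j : Int) + k) = ((j : Int) + (k.toNat : Int)) := by omega
        rw [hk', PySem.List.slice_natCast_add arr j k.toNat]
        rfl
      rw [hcomp]
      have hKK : ((arr.length : Int) - k + 1 - 0).toNat = ((arr.length : Int) - k).toNat + 1 := by
        omega
      rw [hKK, List.range_succ_eq_map, List.map_cons, List.map_map]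
      have h00 : (k - k).toNat = 0 := by omega
      simp only [h00, zero_add, List.drop_zero, List.cons_append, List.nil_append]
      congr 1
      apply List.map_congr_left
      intro b _
      simp only [Function.comp_apply, Nat.succ_eq_add_one]
      rw [Nat.add_comm 1 b]
  · subst hk0 harr
    decide
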